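-- pv_equiv track=rewrite | github.com/Diego77Blaze/Algoritmia | Lab4/Ejer4.py | posicionesTablaUsadas
-- ===== SOURCE A (Python) =====
-- def posicionesTablaUsadas(maxfila, lista, maxAlforja, weightUsed, result):
--     fila = []
--     if maxfila >= 0:
--         if lista[maxfila][2] == 0 and maxAlforja >= weightUsed + lista[maxfila][0]:
--             listaAux = lista
--             fila.append(lista[maxfila][0])
--             fila.append(lista[maxfila][1])
--             fila.append(1)
--             listaAux.pop(maxfila)
--             listaAux.insert(maxfila, fila)
--             listaAux = posicionesTablaUsadas(maxfila - 1, lista, maxAlforja, weightUsed + lista[maxfila][0],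
--                                              result + lista[maxfila][1])
--         else:
--             listaAux = posicionesTablaUsadas(maxfila - 1, lista, maxAlforja, weightUsed, result)
--     else:
--         listaAux = lista
--     return listaAux
-- ===== SOURCE B (Python) =====
-- def posicionesTablaUsadas(maxfila, lista, maxAlforja, weightUsed, result):
--     # explicit descending loop; in-place O(1) row replacement instead of pop+insert
--     # (result is unused, as in A, where it never affects the return value)
--     for i in range(maxfila, -1, -1):
--         if lista[i][2] == 0 and maxAlforja >= weightUsed + lista[i][0]:
--             weightUsed += lista[i][0]
--             lista[i] = [lista[i][0], lista[i][1], 1]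
--     return lista
-- ===== Notes on version B (the rewrite author's own statement) =====
-- stated objective: simpler
-- what changed: Replaced the linear tail recursion with an explicit descending for-loop that replaces each chosen row by index assignment instead of pop+insert, carrying weightUsed as a running variable.
import Mathlib
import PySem

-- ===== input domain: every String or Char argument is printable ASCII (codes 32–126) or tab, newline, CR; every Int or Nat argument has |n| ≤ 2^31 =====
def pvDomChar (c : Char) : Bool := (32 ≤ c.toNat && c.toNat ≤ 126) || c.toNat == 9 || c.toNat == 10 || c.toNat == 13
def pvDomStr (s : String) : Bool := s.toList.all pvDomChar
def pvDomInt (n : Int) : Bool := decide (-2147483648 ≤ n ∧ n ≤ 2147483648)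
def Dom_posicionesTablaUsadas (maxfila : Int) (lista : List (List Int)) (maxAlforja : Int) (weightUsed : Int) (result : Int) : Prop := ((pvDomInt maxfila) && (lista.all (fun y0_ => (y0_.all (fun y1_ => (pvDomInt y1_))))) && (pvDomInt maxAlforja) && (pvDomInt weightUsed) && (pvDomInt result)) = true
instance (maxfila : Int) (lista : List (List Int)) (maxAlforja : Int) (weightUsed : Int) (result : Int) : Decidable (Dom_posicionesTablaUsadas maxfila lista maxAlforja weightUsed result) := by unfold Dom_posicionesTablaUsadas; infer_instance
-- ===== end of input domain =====

-- B replaces A's tail recursion (pop+insert per chosen row) by a descending loop with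
-- in-place index assignment and a running weightUsed; same in-place mutation, same return value.

-- ===== PORT A =====
-- literal port of A's recursion; pyGet?/pop? return none on IndexError, here defaulted —
-- Pre_posicionesTablaUsadas excludes exactly those inputs.
def posicionesTablaUsadas (maxfila : Int) (lista : List (List Int)) (maxAlforja : Int) (weightUsed : Int) (result : Int) : List (List Int) :=
  if h : 0 ≤ maxfila then
    let row := (PySem.List.pyGet? lista maxfila).getD []
    if (PySem.List.pyGet? row 2).getD 0 = 0 ∧ weightUsed + (PySem.List.pyGet? row 0).getD 0 ≤ maxAlforja then
      let fila : List Int := [(PySem.List.pyGet? row 0).getD 0, (PySem.List.pyGet? row 1).getD 0, 1]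
      let popped := ((PySem.List.pop? lista maxfila).getD ([], lista)).2
      let lista' := PySem.List.insert popped maxfila fila
      let row' := (PySem.List.pyGet? lista' maxfila).getD []
      posicionesTablaUsadas (maxfila - 1) lista' maxAlforja
        (weightUsed + (PySem.List.pyGet? row' 0).getD 0) (result + (PySem.List.pyGet? row' 1).getD 0)
    else
      posicionesTablaUsadas (maxfila - 1) lista maxAlforja weightUsed result
  else
    lista
termination_by (maxfila + 1).toNat
decreasing_by all_goals omega

-- ===== PORT B =====
def posicionesTablaUsadas_alt (maxfila : Int) (lista : List (List Int)) (maxAlforja : Int) (weightUsed : Int) (result : Int) : List (List Int) :=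
  ((PySem.List.pyRange maxfila (-1) (-1)).foldl
    (fun (st : List (List Int) × Int) i =>
      let row := (PySem.List.pyGet? st.1 i).getD []
      if (PySem.List.pyGet? row 2).getD 0 = 0 ∧ st.2 + (PySem.List.pyGet? row 0).getD 0 ≤ maxAlforja then
        (PySem.List.pySetD st.1 i [(PySem.List.pyGet? row 0).getD 0, (PySem.List.pyGet? row 1).getD 0, 1],
         st.2 + (PySem.List.pyGet? row 0).getD 0)
      else st)
    (lista, weightUsed)).1

-- ===== PRECONDITION & SPEC =====
-- Pre_ excludes exactly the inputs on which A raises IndexError: maxfila beyond the list,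
-- or a visited row (indices 0..maxfila) shorter than 3 elements.
def Pre_posicionesTablaUsadas (maxfila : Int) (lista : List (List Int)) (maxAlforja : Int) (weightUsed : Int) (result : Int) : Prop :=
  maxfila < (lista.length : Int) ∧ ∀ row ∈ lista.take (maxfila + 1).toNat, 3 ≤ row.length
instance (maxfila : Int) (lista : List (List Int)) (maxAlforja : Int) (weightUsed : Int) (result : Int) : Decidable (Pre_posicionesTablaUsadas maxfila lista maxAlforja weightUsed result) := by unfold Pre_posicionesTablaUsadas; infer_instance

def pvWitness_posicionesTablaUsadas : Int × List (List Int) × Int × Int × Int :=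
  (1, [[2, 3, 0], [4, 5, 0]], 10, 0, 0)

def Spec_posicionesTablaUsadas (maxfila : Int) (lista : List (List Int)) (maxAlforja : Int) (weightUsed : Int) (result : Int) (out : List (List Int)) : Prop := out = posicionesTablaUsadas_alt maxfila lista maxAlforja weightUsed result
instance (maxfila : Int) (lista : List (List Int)) (maxAlforja : Int) (weightUsed : Int) (result : Int) (out : List (List Int)) : Decidable (Spec_posicionesTablaUsadas maxfila lista maxAlforja weightUsed result out) := by unfold Spec_posicionesTablaUsadas; infer_instance

-- ===== CLAIM (what is proved, stated in full; the proofs are below) =====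
def Claim_equal_posicionesTablaUsadas : Prop := ∀ (maxfila : Int) (lista : List (List Int)) (maxAlforja : Int) (weightUsed : Int) (result : Int), Dom_posicionesTablaUsadas maxfila lista maxAlforja weightUsed result → Pre_posicionesTablaUsadas maxfila lista maxAlforja weightUsed result → Spec_posicionesTablaUsadas maxfila lista maxAlforja weightUsed result (posicionesTablaUsadas maxfila lista maxAlforja weightUsed result)

-- ===== LEMMAS AND PROOFS =====

theorem pv_popinsert_set (l : List (List Int)) (m : Nat) (hm : m < l.length) (fila : List Int) :
    PySem.List.insert (l.eraseIdx m) ((m : Nat) : Int) fila = l.set m fila := by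
  rw [PySem.List.insert_natCast _ m _ (by simp [List.length_eraseIdx, hm]; omega),
      List.eraseIdx_eq_take_drop_succ, List.set_eq_take_append_cons_drop]
  have hlen : (List.take m l).length = m := by simp; omega
  rw [if_pos hm, List.take_append_of_le_length (by omega), List.take_take,
      List.drop_append_of_le_length (by omega)]
  simp

theorem pv_take_set (l : List (List Int)) (m : Nat) (fila : List Int) :
    (l.set m fila).take m = l.take m := by
  rw [List.take_set, List.set_eq_of_length_le (by simp)]

theorem pv_main : ∀ (n : Nat) (maxfila : Int) (lista : List (List Int)) (maxAlforja weightUsed result : Int),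
    (maxfila + 1).toNat = n →
    maxfila < (lista.length : Int) →
    (∀ row ∈ lista.take (maxfila + 1).toNat, 3 ≤ row.length) →
    posicionesTablaUsadas maxfila lista maxAlforja weightUsed result =
      posicionesTablaUsadas_alt maxfila lista maxAlforja weightUsed result := by
  intro n
  induction n with
  | zero =>
    intro maxfila lista maxAlforja weightUsed result hn hlt hrows
    rw [posicionesTablaUsadas]
    simp [show ¬ (0 ≤ maxfila) by omega, posicionesTablaUsadas_alt,
      PySem.List.pyRange_neg_one_eq_nil (show maxfila ≤ -1 by omega)]
  | succ k ih =>
    intro maxfila lista maxAlforja weightUsed result hn hlt hrows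
    by_cases h0 : 0 ≤ maxfila
    · obtain ⟨m, rfl⟩ : ∃ m : Nat, maxfila = (m : Int) := ⟨maxfila.toNat, by omega⟩
      have hm : m < lista.length := by exact_mod_cast hlt
      have hmk : m = k := by omega
      rw [posicionesTablaUsadas]
      rw [dif_pos h0]
      unfold posicionesTablaUsadas_alt
      rw [PySem.List.pyRange_neg_one_cons (show (-1:Int) < (m:Int) by omega), List.foldl_cons]
      simp only []
      set row := (PySem.List.pyGet? lista (m:Int)).getD [] with hrow
      by_cases hC : (PySem.List.pyGet? row 2).getD 0 = 0 ∧ weightUsed + (PySem.List.pyGet? row 0).getD 0 ≤ maxAlforja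
      · rw [if_pos hC, if_pos hC]
        set w := (PySem.List.pyGet? row 0).getD 0 with hw
        set v := (PySem.List.pyGet? row 1).getD 0 with hv
        have hpop : ((PySem.List.pop? lista (m:Int)).getD ([], lista)).2 = lista.eraseIdx m := by
          rw [PySem.List.pop?_natCast lista m hm]; rfl
        rw [hpop, pv_popinsert_set lista m hm [w, v, 1]]
        have hget : (PySem.List.pyGet? (lista.set m [w, v, 1]) (m:Int)).getD [] = [w, v, 1] := by
          rw [PySem.List.pyGet?_natCast, List.getElem?_set_self (by simpa using hm)]; rfl
        rw [hget]
        have h1 : (PySem.List.pyGet? [w, v, 1] 0).getD 0 = w := rfl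
        have h2 : (PySem.List.pyGet? [w, v, 1] 1).getD 0 = v := rfl
        rw [h1, h2]
        have halt : ∀ r : Int, posicionesTablaUsadas ((m:Int) - 1) (lista.set m [w, v, 1]) maxAlforja (weightUsed + w) r =
            posicionesTablaUsadas_alt ((m:Int) - 1) (lista.set m [w, v, 1]) maxAlforja (weightUsed + w) r := by
          intro r
          apply ih _ _ _ _ _ (by omega) (by simp; omega)
          intro rr hrr
          have : ((m:Int) - 1 + 1).toNat = m := by omega
          rw [this, pv_take_set] at hrr
          exact hrows rr (List.mem_of_mem_take (by
            have : lista.take m = (lista.take (((m:Int)+1).toNat)).take m := by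
              rw [List.take_take]; congr 1; omega
            rw [this] at hrr; exact hrr))
        rw [halt]
        rw [posicionesTablaUsadas_alt]
        simp [PySem.List.pySetD_natCast]
      · rw [if_neg hC, if_neg hC]
        rw [ih _ _ _ _ _ (by omega) (by omega) ?_, posicionesTablaUsadas_alt]
        intro rr hrr
        apply hrows rr
        have : lista.take (((m:Int) - 1 + 1).toNat) = (lista.take (((m:Int)+1).toNat)).take m := by
          rw [List.take_take]; congr 1 <;> omega
        rw [this] at hrr
        exact List.mem_of_mem_take hrr
    · rw [posicionesTablaUsadas]
      simp [h0, posicionesTablaUsadas_alt,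
        PySem.List.pyRange_neg_one_eq_nil (show maxfila ≤ -1 by omega)]

-- ===== VERDICT (by name: the statement is the Claim_ definition above) =====
theorem posicionesTablaUsadas_spec : Claim_equal_posicionesTablaUsadas := by
  intro maxfila lista maxAlforja weightUsed result _ hpre
  exact pv_main _ maxfila lista maxAlforja weightUsed result rfl hpre.1 hpre.2
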